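-- pv_equiv track=rewrite | github.com/4pito3pito2pi/unveil-static-site | gen-appendix.py | compress_pages
-- ===== SOURCE A (Python) =====
-- def compress_pages(pages):
--     """Generate page reference links, compressing consecutive runs."""
--     if not pages:
--         return ''
--     parts = []
--     i = 0
--     while i < len(pages):
--         start = pages[i]
--         end = start
--         while i + 1 < len(pages) and pages[i + 1] == end + 1:
--             i += 1
--             end = pages[i]
--         if start == end:
--             parts.append(f'<a href="rawcorpus.html#p{start}">{start}</a>')
--         elif end - start <= 2:
--             for p in range(start, end + 1):
--                 parts.append(f'<a href="rawcorpus.html#p{p}">{p}</a>')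
--         else:
--             parts.append(
--                 f'<a href="rawcorpus.html#p{start}">{start}</a>'
--                 f'\u2013<a href="rawcorpus.html#p{end}">{end}</a>'
--             )
--         i += 1
--     return ' '.join(parts)
-- ===== SOURCE B (Python) =====
-- def compress_pages(pages):
--     """Generate page reference links, compressing consecutive runs."""
--     n = len(pages)
--     # up[i] = distance from i back to the start of its consecutive run
--     up = [0] * n
--     for i in range(1, n):
--         up[i] = up[i - 1] + 1 if pages[i] == pages[i - 1] + 1 else 0
--     # down[i] = distance from i forward to the end of its consecutive run
--     down = [0] * n
--     for i in range(n - 2, -1, -1):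
--         down[i] = down[i + 1] + 1 if pages[i + 1] == pages[i] + 1 else 0
--     parts = []
--     for i, p in enumerate(pages):
--         if up[i] + down[i] <= 2:
--             parts.append(f'<a href="rawcorpus.html#p{p}">{p}</a>')
--         elif up[i] == 0:
--             parts.append(
--                 f'<a href="rawcorpus.html#p{p}">{p}</a>'
--                 f'\u2013<a href="rawcorpus.html#p{p + down[i]}">{p + down[i]}</a>'
--             )
--     return ' '.join(parts)
-- ===== Notes on version B (the rewrite author's own statement) =====
-- stated objective: alternative
-- what changed: Instead of nested while-loops tracking runs, B computes per-element run offsets in two staged scans (up = distance to run start, down = distance to run end) and then emits parts element-by-element: a plain link when the run span up+down <= 2, the start-dash-end range link only at run starts (up == 0) with the end computed arithmetically as p + down, nothing elsewhere.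
import Mathlib
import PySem

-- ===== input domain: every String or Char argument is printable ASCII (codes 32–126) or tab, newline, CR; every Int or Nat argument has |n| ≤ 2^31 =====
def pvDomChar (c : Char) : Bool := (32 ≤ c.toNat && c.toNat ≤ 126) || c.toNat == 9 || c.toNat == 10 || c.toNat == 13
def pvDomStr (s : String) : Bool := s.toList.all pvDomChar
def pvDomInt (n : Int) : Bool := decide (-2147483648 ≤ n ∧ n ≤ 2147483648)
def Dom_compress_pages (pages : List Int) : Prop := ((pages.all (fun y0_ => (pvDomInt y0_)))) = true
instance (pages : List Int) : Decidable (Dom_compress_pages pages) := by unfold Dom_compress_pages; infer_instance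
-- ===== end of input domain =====

-- B replaces A's nested run-tracking while-loops by two staged scans computing per-element
-- run offsets (up = distance to run start, down = distance to run end) plus a flat per-element
-- emission pass (objective: alternative; same output, including '' on empty input).

-- ===== PORT A =====
-- the f-string '<a href="rawcorpus.html#p{p}">{p}</a>' (identical in A and B)
def mkLink (p : Int) : String :=
  "<a href=\"rawcorpus.html#p" ++ PySem.Int.toStr p ++ "\">" ++ PySem.Int.toStr p ++ "</a>"

-- A's inner while loop: advance while the next page equals end+1; returns (end, remaining pages)
def innerA : List Int → Int → Int × List Int
  | [], e => (e, [])
  | x :: xs, e => if x = e + 1 then innerA xs x else (e, x :: xs)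

theorem innerA_len_le : ∀ (xs : List Int) (e : Int), (innerA xs e).2.length ≤ xs.length := by
  intro xs
  induction xs with
  | nil => intro e; simp [innerA]
  | cons x xs ih =>
    intro e
    simp only [innerA]
    split
    · exact Nat.le_succ_of_le (ih x)
    · simp

-- A's per-run branch (start == end / end - start <= 2 / range link)
def fmtRun (s e : Int) : List String :=
  if s = e then [mkLink s]
  else if e - s ≤ 2 then (PySem.List.pyRange s (e + 1) 1).map mkLink
  else [mkLink s ++ "\u2013" ++ mkLink e]

-- A's outer while loop accumulating parts
def partsA : List Int → List String
  | [] => []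
  | x :: xs =>
    let r := innerA xs x
    fmtRun x r.1 ++ partsA r.2
termination_by xs => xs.length
decreasing_by
  have := innerA_len_le xs x
  simpa using Nat.lt_succ_of_le this

def compress_pages (pages : List Int) : String :=
  if pages.isEmpty then "" else PySem.Str.join " " (partsA pages)

-- ===== PORT B =====
-- Source B's first loop: up[i] = up[i-1]+1 if pages[i] == pages[i-1]+1 else 0, threading (prev value, prev up)
def upAuxB (prev : Int) (u : Nat) : List Int → List Nat
  | [] => []
  | x :: xs => if x = prev + 1 then (u + 1) :: upAuxB x (u + 1) xs else 0 :: upAuxB x 0 xs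

def upB : List Int → List Nat
  | [] => []
  | x :: xs => 0 :: upAuxB x 0 xs

-- Source B's second (backward) loop: down[i] = down[i+1]+1 if pages[i+1] == pages[i]+1 else 0
def downB : List Int → List Nat
  | [] => []
  | [_] => [0]
  | x :: y :: xs =>
    let ds := downB (y :: xs)
    (if y = x + 1 then ds.headD 0 + 1 else 0) :: ds

-- Source B's emission loop over (p, up[i], down[i])
def emitB : List (Int × Nat × Nat) → List String
  | [] => []
  | (p, u, d) :: rest =>
    (if u + d ≤ 2 then [mkLink p]
     else if u = 0 then [mkLink p ++ "\u2013" ++ mkLink (p + (d : Int))]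
     else []) ++ emitB rest

def compress_pages_alt (pages : List Int) : String :=
  PySem.Str.join " " (emitB (pages.zip ((upB pages).zip (downB pages))))

-- ===== PRECONDITION & SPEC =====
def Spec_compress_pages (pages : List Int) (out : String) : Prop := out = compress_pages_alt pages
instance (pages : List Int) (out : String) : Decidable (Spec_compress_pages pages out) := by unfold Spec_compress_pages; infer_instance

-- ===== CLAIM (what is proved, stated in full; the proofs are below) =====
def Claim_equal_compress_pages : Prop := ∀ (pages : List Int), Dom_compress_pages pages → Spec_compress_pages pages (compress_pages pages)

-- ===== LEMMAS AND PROOFS =====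

-- the values of a consecutive run: s, s+1, …, s+k-1
def runVals (s : Int) : Nat → List Int
  | 0 => []
  | k + 1 => s :: runVals (s + 1) k

theorem runVals_eq_map : ∀ (k : Nat) (s : Int),
    runVals s k = (List.range k).map (fun (j : Nat) => s + (j : Int)) := by
  intro k
  induction k with
  | zero => intro s; simp [runVals]
  | succ k ih =>
    intro s
    rw [runVals, List.range_succ_eq_map, List.map_cons, List.map_map, ih (s + 1)]
    congr 1
    · simp
    · apply List.map_congr_left
      intro j _
      simp only [Function.comp]
      push_cast
      ring

theorem runVals_length (k : Nat) (s : Int) : (runVals s k).length = k := by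
  rw [runVals_eq_map]; simp

-- A's inner while loop decomposes the list into a maximal run and a non-connecting rest
theorem innerA_full : ∀ (xs : List Int) (x : Int),
    ∃ (k : Nat) (rest : List Int),
      innerA xs x = (x + (k : Int), rest) ∧
      x :: xs = runVals x (k + 1) ++ rest ∧
      (∀ r rt, rest = r :: rt → r ≠ x + (k : Int) + 1) := by
  intro xs
  induction xs with
  | nil =>
    intro x
    refine ⟨0, [], by simp [innerA], by simp [runVals], by simp⟩
  | cons y ys ih =>
    intro x
    by_cases hy : y = x + 1
    · obtain ⟨k, rest, h1, h2, h3⟩ := ih y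
      refine ⟨k + 1, rest, ?_, ?_, ?_⟩
      · simp only [innerA, if_pos hy, h1]
        have : y + (k : Int) = x + ((k + 1 : Nat) : Int) := by subst hy; push_cast; ring
        rw [this]
      · rw [show runVals x (k + 1 + 1) = x :: runVals (x + 1) (k + 1) from rfl,
          ← hy, List.cons_append, ← h2]
      · intro r rt hr
        have hne := h3 r rt hr
        subst hy
        intro hc
        apply hne
        rw [hc]; push_cast; ring
    · refine ⟨0, y :: ys, ?_, ?_, ?_⟩
      · simp [innerA, hy]
      · simp [runVals]
      · intro r rt hr hc
        injection hr with hyr _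
        apply hy
        rw [hyr, hc]
        push_cast; ring

-- upAuxB over a run tail: counts u+1, u+2, … and threads (run end, u+k) into the rest
theorem upAuxB_run : ∀ (k : Nat) (s : Int) (u : Nat) (rest : List Int),
    upAuxB s u (runVals (s + 1) k ++ rest) =
      List.range' (u + 1) k ++ upAuxB (s + (k : Int)) (u + k) rest := by
  intro k
  induction k with
  | zero => intro s u rest; simp [runVals]
  | succ k ih =>
    intro s u rest
    rw [show runVals (s + 1) (k + 1) = (s + 1) :: runVals (s + 1 + 1) k from rfl]
    rw [List.cons_append]
    rw [show upAuxB s u ((s + 1) :: (runVals (s + 1 + 1) k ++ rest)) =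
          (u + 1) :: upAuxB (s + 1) (u + 1) (runVals (s + 1 + 1) k ++ rest) by
        simp [upAuxB]]
    rw [ih (s + 1) (u + 1) rest, List.range'_succ]
    have h1 : s + 1 + (k : Int) = s + ((k + 1 : Nat) : Int) := by push_cast; ring
    have h2 : u + 1 + k = u + (k + 1) := by omega
    rw [h1, h2, List.cons_append]

-- at a run boundary the up counter resets: upAuxB = upB on the rest
theorem upAuxB_boundary (e : Int) (u : Nat) (rest : List Int)
    (h : ∀ r rt, rest = r :: rt → r ≠ e + 1) :
    upAuxB e u rest = upB rest := by
  cases rest with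
  | nil => simp [upAuxB, upB]
  | cons r rt =>
    have := h r rt rfl
    simp [upAuxB, upB, this]

-- downB over a run: k, k-1, …, 0, then downB of the non-connecting rest
theorem downB_run : ∀ (k : Nat) (s : Int) (rest : List Int),
    (∀ r rt, rest = r :: rt → r ≠ s + (k : Int) + 1) →
    downB (runVals s (k + 1) ++ rest) = (List.range (k + 1)).reverse ++ downB rest := by
  intro k
  induction k with
  | zero =>
    intro s rest h
    cases rest with
    | nil => simp [runVals, downB]
    | cons r rt =>
      have hr : r ≠ s + 1 := by have := h r rt rfl; simpa using this
      simp [runVals, downB, hr]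
  | succ k ih =>
    intro s rest h
    have hih : downB (runVals (s + 1) (k + 1) ++ rest) =
        (List.range (k + 1)).reverse ++ downB rest := by
      apply ih (s + 1) rest
      intro r rt hr
      have hne := h r rt hr
      intro hc; apply hne; rw [hc]; push_cast; ring
    have hcons : runVals (s + 1) (k + 1) ++ rest =
        (s + 1) :: (runVals (s + 1 + 1) k ++ rest) := rfl
    rw [show runVals s (k + 1 + 1) ++ rest = s :: (runVals (s + 1) (k + 1) ++ rest) from rfl]
    rw [hcons]
    rw [show downB (s :: (s + 1) :: (runVals (s + 1 + 1) k ++ rest)) =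
          (if s + 1 = s + 1 then (downB ((s + 1) :: (runVals (s + 1 + 1) k ++ rest))).headD 0 + 1
           else 0) :: downB ((s + 1) :: (runVals (s + 1 + 1) k ++ rest)) from rfl]
    rw [← hcons, hih, if_pos rfl]
    rw [show List.range (k + 1 + 1) = List.range (k + 1) ++ [k + 1] from List.range_succ,
      List.reverse_append]
    rw [show (List.range (k + 1)).reverse = k :: (List.range k).reverse by
      rw [List.range_succ, List.reverse_append]; rfl]
    simp

-- emitB distributes over append
theorem emitB_append : ∀ (a b : List (Int × Nat × Nat)),
    emitB (a ++ b) = emitB a ++ emitB b := by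
  intro a b
  induction a with
  | nil => simp [emitB]
  | cons p ps ih =>
    obtain ⟨p1, p2, p3⟩ := p
    simp [emitB, ih]

-- reversing List.range is subtraction from the top
theorem rev_range : ∀ (k : Nat),
    (List.range (k + 1)).reverse = (List.range (k + 1)).map (fun (j : Nat) => k - j) := by
  intro k
  induction k with
  | zero => simp
  | succ k ih =>
    have hL : (List.range (k + 1 + 1)).reverse = (k + 1) :: (List.range (k + 1)).reverse := by
      rw [List.range_succ, List.reverse_append]; rfl
    have hR : (List.range (k + 1 + 1)).map (fun (j : Nat) => k + 1 - j) =
        (k + 1) :: (List.range (k + 1)).map (fun (j : Nat) => k - j) := by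
      rw [List.range_succ_eq_map]
      simp [List.map_map, Function.comp, Nat.succ_sub_succ]
    rw [hL, hR, ih]

-- the zipped triple list of one run, as a map over range
theorem zip_run (k : Nat) (x : Int) :
    (runVals x (k + 1)).zip ((List.range' 0 (k + 1)).zip ((List.range (k + 1)).reverse)) =
      (List.range (k + 1)).map (fun (j : Nat) => (x + (j : Int), j, k - j)) := by
  rw [runVals_eq_map, rev_range,
    show List.range' 0 (k + 1) = (List.range (k + 1)).map (fun (j : Nat) => j) by
      rw [List.range_eq_range']; simp,
    List.zip_map', List.zip_map']

-- emitB emits nothing on elements with span > 2 that are not run starts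
theorem emitB_nil_of (l : List (Int × Nat × Nat))
    (h : ∀ p ∈ l, ¬ (p.2.1 + p.2.2 ≤ 2) ∧ p.2.1 ≠ 0) : emitB l = [] := by
  induction l with
  | nil => simp [emitB]
  | cons p ps ih =>
    obtain ⟨p1, p2, p3⟩ := p
    have hp := h (p1, p2, p3) (List.mem_cons_self)
    simp only [emitB]
    rw [if_neg hp.1, if_neg hp.2, List.nil_append]
    exact ih (fun q hq => h q (List.mem_cons_of_mem _ hq))

-- emission over one run equals A's per-run formatting
theorem emit_run : ∀ (k : Nat) (x : Int),
    emitB ((List.range (k + 1)).map (fun (j : Nat) => (x + (j : Int), j, k - j))) =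
      fmtRun x (x + (k : Int)) := by
  intro k x
  by_cases hk : k ≤ 2
  · interval_cases k
    · show emitB [(x + ((0 : Nat) : Int), 0, 0)] = fmtRun x (x + ((0 : Nat) : Int))
      simp [emitB, fmtRun]
    · show emitB [(x + ((0 : Nat) : Int), 0, 1), (x + ((1 : Nat) : Int), 1, 0)] =
        fmtRun x (x + ((1 : Nat) : Int))
      rw [fmtRun, if_neg (by omega), if_pos (by omega)]
      rw [PySem.List.pyRange_one_cons (by omega), PySem.List.pyRange_one_cons (by omega),
        PySem.List.pyRange_one_eq_nil (by omega)]
      simp [emitB]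
    · show emitB [(x + ((0 : Nat) : Int), 0, 2), (x + ((1 : Nat) : Int), 1, 1),
          (x + ((2 : Nat) : Int), 2, 0)] = fmtRun x (x + ((2 : Nat) : Int))
      rw [fmtRun, if_neg (by omega), if_pos (by omega)]
      rw [PySem.List.pyRange_one_cons (by omega), PySem.List.pyRange_one_cons (by omega),
        PySem.List.pyRange_one_cons (by omega), PySem.List.pyRange_one_eq_nil (by omega),
        show (x : Int) + 1 + 1 = x + 2 by ring]
      simp [emitB]
  · rw [show List.range (k + 1) = 0 :: (List.range k).map Nat.succ from List.range_succ_eq_map,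
      List.map_cons]
    rw [show emitB ((x + ((0 : Nat) : Int), 0, k - 0) ::
          ((List.range k).map Nat.succ).map (fun (j : Nat) => (x + (j : Int), j, k - j))) =
        (if 0 + (k - 0) ≤ 2 then [mkLink (x + ((0 : Nat) : Int))]
         else [mkLink (x + ((0 : Nat) : Int)) ++ "\u2013" ++
           mkLink (x + ((0 : Nat) : Int) + ((k - 0 : Nat) : Int))]) ++
        emitB (((List.range k).map Nat.succ).map (fun (j : Nat) => (x + (j : Int), j, k - j)))
      from by simp [emitB]]
    rw [if_neg (by omega)]
    have hnil : emitB (((List.range k).map Nat.succ).map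
        (fun (j : Nat) => (x + (j : Int), j, k - j))) = [] := by
      apply emitB_nil_of
      intro p hp
      rw [List.map_map] at hp
      obtain ⟨j, hj, hpe⟩ := List.mem_map.mp hp
      have hjk : j < k := List.mem_range.mp hj
      subst hpe
      simp only [Function.comp]
      omega
    rw [hnil, fmtRun, if_neg (by omega), if_neg (by omega)]
    simp

-- B's three passes produce exactly A's parts list
theorem emit_all : ∀ (xs : List Int),
    emitB (xs.zip ((upB xs).zip (downB xs))) = partsA xs
  | [] => by simp [upB, downB, emitB, partsA]
  | x :: xs' => by
    obtain ⟨k, rest, h1, h2, h3⟩ := innerA_full xs' x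
    have hup : upB (runVals x (k + 1) ++ rest) = List.range' 0 (k + 1) ++ upB rest := by
      rw [show runVals x (k + 1) ++ rest = x :: (runVals (x + 1) k ++ rest) from rfl,
        show upB (x :: (runVals (x + 1) k ++ rest)) =
          0 :: upAuxB x 0 (runVals (x + 1) k ++ rest) from rfl,
        upAuxB_run k x 0 rest, upAuxB_boundary _ _ _ h3, List.range'_succ]
      simp
    have hdown : downB (runVals x (k + 1) ++ rest) =
        (List.range (k + 1)).reverse ++ downB rest := downB_run k x rest h3
    have hlen : rest.length < xs'.length + 1 := by
      have := congrArg List.length h2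
      simp [runVals_length] at this
      omega
    conv_lhs => rw [h2]
    rw [hup, hdown,
      List.zip_append (by simp), List.zip_append (by simp [runVals_length]),
      emitB_append, zip_run, emit_run, emit_all rest]
    conv_rhs => rw [partsA]
    rw [h1]
  termination_by xs => xs.length
  decreasing_by simpa using hlen

-- ===== VERDICT (by name: the statement is the Claim_ definition above) =====
theorem compress_pages_spec : Claim_equal_compress_pages := by
  intro pages _
  unfold Spec_compress_pages compress_pages compress_pages_alt
  rw [emit_all pages]
  cases pages with
  | nil => simp [partsA, PySem.Str.join]
  | cons x xs => simp
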